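-- pv_equiv track=rewrite | github.com/thisAbdU/A2SV-contest-Exercises | B_378_QAQ_and_Mocha_s_Array.py | is_beautiful_array
-- ===== SOURCE A (Python) =====
-- def is_beautiful_array(n, arr):
--     if n < 3:
--         return False
--
--     arr.sort()
--     min1 = arr[0]
--     min2 = None
--
--     for num in arr[1:]:
--         if num % min1 != 0:
--             min2 = num
--             break
--
--     if min2 is None:
--         return True
--
--     for num in arr:
--         if num % min1 != 0 and num % min2 != 0:
--             return False
--     return True
-- ===== SOURCE B (Python) =====
-- def is_beautiful_array(n, arr):
--     if n < 3:
--         return False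
--
--     def sieve(xs):
--         if not xs:
--             return []
--         m = min(xs)
--         return [x for x in xs if x % m != 0]
--
--     return not sieve(sieve(arr))
-- ===== Notes on version B (the rewrite author's own statement) =====
-- stated objective: simpler
-- what changed: Replaces A's sort + explicit (min1, min2) bookkeeping + final full divisibility scan with one uniform 'sieve' helper (drop every multiple of the list's minimum) applied twice: the array is beautiful iff two sieve rounds empty it; no sort, no named pivots, no final pass over the whole array.
-- outside the precondition, e.g. on is_beautiful_array(3, [0]): A returns True, B raises ZeroDivisionError
import Mathlib
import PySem

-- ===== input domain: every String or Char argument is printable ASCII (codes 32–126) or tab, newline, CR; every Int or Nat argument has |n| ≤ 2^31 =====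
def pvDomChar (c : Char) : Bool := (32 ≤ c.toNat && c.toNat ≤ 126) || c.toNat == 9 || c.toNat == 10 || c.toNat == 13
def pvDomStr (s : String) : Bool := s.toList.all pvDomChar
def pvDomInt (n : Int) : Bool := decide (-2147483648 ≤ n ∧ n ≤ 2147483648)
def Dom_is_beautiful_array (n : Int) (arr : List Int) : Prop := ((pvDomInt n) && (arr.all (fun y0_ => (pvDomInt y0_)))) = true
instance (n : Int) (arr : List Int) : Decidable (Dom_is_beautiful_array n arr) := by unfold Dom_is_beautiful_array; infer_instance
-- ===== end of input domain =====

-- B replaces A's sort + (min1,min2) bookkeeping + final scan with one 'sieve' helper (drop multiples of the minimum) applied twice, deciding by emptiness; A sorts arr in place (return-value equivalence only), B does not mutate it.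


-- ===== PORT A =====
-- first loop of A: first element with num % min1 != 0 (break), none if the loop finishes
def pvFindMin2 (min1 : Int) : List Int → Option Int
  | [] => none
  | x :: t => if PySem.Int.mod x min1 ≠ 0 then some x else pvFindMin2 min1 t

-- second loop of A: early-return False on num % min1 != 0 and num % min2 != 0
def pvCheckLoop (min1 min2 : Int) : List Int → Bool
  | [] => true
  | x :: t => if PySem.Int.mod x min1 ≠ 0 ∧ PySem.Int.mod x min2 ≠ 0 then false
              else pvCheckLoop min1 min2 t

def is_beautiful_array (n : Int) (arr : List Int) : Bool :=
  if n < 3 then false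
  else
    match PySem.List.sorted arr (fun x => x) false with   -- arr.sort()
    | [] => false                                         -- arr[0] raises IndexError; outside Pre_
    | min1 :: rest =>                                     -- min1 = arr[0], rest = arr[1:]
      match pvFindMin2 min1 rest with
      | none => true
      | some min2 => pvCheckLoop min1 min2 (min1 :: rest)

-- ===== PORT B =====
-- B's helper sieve(xs): [] on an empty list, else drop every multiple of min(xs)
def pvSieve (xs : List Int) : List Int :=
  match xs with
  | [] => []
  | _ :: _ =>
    match PySem.List.min? xs (fun x => x) with            -- m = min(xs); some on a nonempty list
    | none => []
    | some m => xs.filter (fun x => PySem.Int.mod x m != 0)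

def is_beautiful_array_alt (n : Int) (arr : List Int) : Bool :=
  if n < 3 then false
  else (pvSieve (pvSieve arr)).isEmpty                    -- not sieve(sieve(arr))

-- ===== PRECONDITION & SPEC =====
-- Pre_ excludes exactly the inputs where the Pythons raise: with n ≥ 3, A raises IndexError on an
-- empty arr and ZeroDivisionError when min(arr) = 0 and len ≥ 2; on the remaining min-zero input
-- (arr = [0]) A accidentally returns True while B's uniform min-based sieve itself raises
-- ZeroDivisionError, so all min-zero arrays stay outside Pre_.
def Pre_is_beautiful_array (n : Int) (arr : List Int) : Prop :=
  3 ≤ n → (arr ≠ [] ∧ ¬ (0 ∈ arr ∧ ∀ x ∈ arr, 0 ≤ x))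
instance (n : Int) (arr : List Int) : Decidable (Pre_is_beautiful_array n arr) := by
  unfold Pre_is_beautiful_array; infer_instance

def pvWitness_is_beautiful_array : Int × List Int := (3, [2, 4, 3])

def Spec_is_beautiful_array (n : Int) (arr : List Int) (out : Bool) : Prop := out = is_beautiful_array_alt n arr
instance (n : Int) (arr : List Int) (out : Bool) : Decidable (Spec_is_beautiful_array n arr out) := by unfold Spec_is_beautiful_array; infer_instance

-- ===== CLAIM (what is proved, stated in full; the proofs are below) =====
def Claim_equal_is_beautiful_array : Prop := ∀ (n : Int) (arr : List Int), Dom_is_beautiful_array n arr → Pre_is_beautiful_array n arr → Spec_is_beautiful_array n arr (is_beautiful_array n arr)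

-- ===== LEMMAS AND PROOFS =====

-- min? of any rearrangement of a ≤-sorted list is that list's head
lemma pv_min?_eq_head? (l l' : List Int) (hp : l.Perm l') (hs : l.Pairwise (· ≤ ·)) :
    PySem.List.min? l' (fun x => x) = l.head? := by
  cases l with
  | nil =>
    have : l' = [] := hp.symm.eq_nil
    simp [this, PySem.List.min?_eq_none_iff]
  | cons a t =>
    have hne : l' ≠ [] := by
      intro h; subst h; exact List.cons_ne_nil a t hp.eq_nil
    obtain ⟨m, hm⟩ := Option.ne_none_iff_exists'.mp
      (fun h => hne ((PySem.List.min?_eq_none_iff (xs := l') (key := fun x => x)).mp h))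
    have hmem : m ∈ a :: t := hp.mem_iff.mpr (PySem.List.min?_mem hm)
    have hma : m ≤ a := PySem.List.min?_isMin hm a (hp.mem_iff.mp (List.mem_cons_self))
    have ham : a ≤ m := by
      rcases List.mem_cons.mp hmem with h | h
      · exact le_of_eq h.symm
      · exact (List.pairwise_cons.mp hs).1 m h
    simp [hm, le_antisymm hma ham]

-- A's first loop is head? of the filtered list
lemma pvFindMin2_eq (m : Int) (l : List Int) :
    pvFindMin2 m l = (l.filter (fun x => PySem.Int.mod x m != 0)).head? := by
  induction l with
  | nil => rfl
  | cons x t ih =>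
    by_cases h : PySem.Int.mod x m ≠ 0 <;> simp [pvFindMin2, h, ih]

-- A's second loop is List.all of the negated condition
lemma pvCheckLoop_eq (m1 m2 : Int) (l : List Int) :
    pvCheckLoop m1 m2 l = l.all (fun x => (PySem.Int.mod x m1 == 0) || (PySem.Int.mod x m2 == 0)) := by
  induction l with
  | nil => rfl
  | cons x t ih =>
    by_cases h1 : PySem.Int.mod x m1 = 0 <;> by_cases h2 : PySem.Int.mod x m2 = 0 <;>
      simp [pvCheckLoop, h1, h2, ih]

lemma pv_perm_all (p : Int → Bool) (l l' : List Int) (hp : l.Perm l') : l.all p = l'.all p := by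
  rcases h : l'.all p with _ | _
  · rcases List.all_eq_false.mp h with ⟨x, hx, hpx⟩
    exact List.all_eq_false.mpr ⟨x, hp.mem_iff.mpr hx, hpx⟩
  · exact List.all_eq_true.mpr fun x hx => List.all_eq_true.mp h x (hp.mem_iff.mp hx)

-- 'all f' is emptiness of the list filtered by ¬f
lemma pv_all_eq_isEmpty_filter (f : Int → Bool) (l : List Int) :
    l.all f = (l.filter (fun x => !f x)).isEmpty := by
  induction l with
  | nil => rfl
  | cons x t ih => by_cases h : f x = true <;> simp [h, ih]

-- ===== VERDICT (by name: the statement is the Claim_ definition above) =====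
theorem is_beautiful_array_spec : Claim_equal_is_beautiful_array := by
  intro n arr _hdom hpre
  unfold Spec_is_beautiful_array is_beautiful_array is_beautiful_array_alt
  by_cases hn : n < 3
  · simp [hn]
  · obtain ⟨hne, _⟩ := hpre (by omega)
    simp only [if_neg hn]
    have hperm : (PySem.List.sorted arr (fun x => x) false).Perm arr := PySem.List.sorted_perm arr _ _
    have hs : (PySem.List.sorted arr (fun x => x) false).Pairwise (· ≤ ·) := by
      simpa using PySem.List.sorted_pairwise arr (fun x => x)
    have hsne : PySem.List.sorted arr (fun x => x) false ≠ [] := by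
      simpa [PySem.List.sorted_eq_nil_iff] using hne
    rcases hsort : PySem.List.sorted arr (fun x => x) false with _ | ⟨min1, rest⟩
    · exact absurd hsort hsne
    · rw [hsort] at hperm hs
      have hm1 : PySem.List.min? arr (fun x => x) = some min1 := by
        rw [pv_min?_eq_head? (min1 :: rest) arr hperm hs]; rfl
      have hmod : PySem.Int.mod min1 min1 = 0 :=
        (PySem.Int.mod_eq_zero_iff_dvd min1 min1).mpr dvd_rfl
      set p : Int → Bool := fun x => PySem.Int.mod x min1 != 0 with hp
      -- B's first sieve is arr.filter p
      have hsieve1 : pvSieve arr = arr.filter p := by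
        rcases arr with _ | ⟨a, t⟩
        · exact absurd rfl hne
        · simp only [pvSieve, hm1, hp]
      have hpermf : ((min1 :: rest).filter p).Perm (arr.filter p) := hperm.filter p
      have hsf : ((min1 :: rest).filter p).Pairwise (· ≤ ·) := hs.filter p
      have hfilter : (min1 :: rest).filter p = rest.filter p := by
        simp [hp, hmod]
      dsimp only
      rw [pvFindMin2_eq, ← hfilter, hsieve1]
      rcases hhd : ((min1 :: rest).filter p).head? with _ | m2
      · -- no second minimum: the first sieve already empties the array
        have h0 : (min1 :: rest).filter p = [] := List.head?_eq_none_iff.mp hhd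
        have h1 : arr.filter p = [] := (h0 ▸ hpermf).symm.eq_nil
        rw [h1]; rfl
      · -- second sieve keyed by m2
        have hFne : arr.filter p ≠ [] := by
          intro h
          have hpermf' := hpermf
          rw [h] at hpermf'
          rw [hpermf'.eq_nil] at hhd
          simp at hhd
        have hm2 : PySem.List.min? (arr.filter p) (fun x => x) = some m2 := by
          rw [pv_min?_eq_head? ((min1 :: rest).filter p) (arr.filter p) hpermf hsf, hhd]
        have hsieve2 : pvSieve (arr.filter p) =
            (arr.filter p).filter (fun x => PySem.Int.mod x m2 != 0) := by
          rcases hF : arr.filter p with _ | ⟨a, t⟩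
          · exact absurd hF hFne
          · rw [← hF]; simp only [pvSieve, hF, hF ▸ hm2]
        rw [hsieve2]
        show pvCheckLoop min1 m2 (min1 :: rest)
          = ((arr.filter p).filter (fun x => PySem.Int.mod x m2 != 0)).isEmpty
        rw [List.filter_filter]
        have hagree : ∀ x : Int,
            ((PySem.Int.mod x m2 != 0) && p x)
              = !((PySem.Int.mod x min1 == 0) || (PySem.Int.mod x m2 == 0)) := by
          intro x
          by_cases h1 : PySem.Int.mod x min1 = 0 <;> by_cases h2 : PySem.Int.mod x m2 = 0 <;>
            simp [hp, h1, h2, bne, Bool.and_comm]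
        calc pvCheckLoop min1 m2 (min1 :: rest)
            = (min1 :: rest).all (fun x => (PySem.Int.mod x min1 == 0) || (PySem.Int.mod x m2 == 0)) := pvCheckLoop_eq _ _ _
          _ = arr.all (fun x => (PySem.Int.mod x min1 == 0) || (PySem.Int.mod x m2 == 0)) := pv_perm_all _ _ _ hperm
          _ = (arr.filter (fun x => !((PySem.Int.mod x min1 == 0) || (PySem.Int.mod x m2 == 0)))).isEmpty := pv_all_eq_isEmpty_filter _ _
          _ = (arr.filter (fun x => (PySem.Int.mod x m2 != 0) && p x)).isEmpty := by
              simp only [hagree]
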